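-- pv_equiv track=rewrite | github.com/mcostat/nes | patientregistrationsystem/qdc/patient/validation.py | _exceptions
-- ===== SOURCE A (Python) =====
-- def _exceptions(cpf):
--     """Se o número de CPF estiver dentro das exceções é inválido"""
--     if len(cpf) != 11:
--         return True
--     else:
--         cpf_str = "".join(str(x) for x in cpf)
--         if cpf_str in (
--             "00000000000",
--             "11111111111",
--             "22222222222",
--             "33333333333",
--             "44444444444",
--             "55555555555",
--             "66666666666",
--             "77777777777",
--             "88888888888",
--             "99999999999",
--         ):
--             return True
--     return False
-- ===== SOURCE B (Python) =====
-- def _exceptions(cpf):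
--     """Se o número de CPF estiver dentro das exceções é inválido"""
--     if len(cpf) != 11:
--         return True
--     d = cpf[0]
--     return 0 <= d <= 9 and all(x == d for x in cpf)
-- ===== Notes on version B (the rewrite author's own statement) =====
-- stated objective: simpler
-- what changed: B drops the string join and the table of 10 literal strings: it tests directly that all 11 entries equal the first one and that this common value is a single digit 0-9.
import Mathlib
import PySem

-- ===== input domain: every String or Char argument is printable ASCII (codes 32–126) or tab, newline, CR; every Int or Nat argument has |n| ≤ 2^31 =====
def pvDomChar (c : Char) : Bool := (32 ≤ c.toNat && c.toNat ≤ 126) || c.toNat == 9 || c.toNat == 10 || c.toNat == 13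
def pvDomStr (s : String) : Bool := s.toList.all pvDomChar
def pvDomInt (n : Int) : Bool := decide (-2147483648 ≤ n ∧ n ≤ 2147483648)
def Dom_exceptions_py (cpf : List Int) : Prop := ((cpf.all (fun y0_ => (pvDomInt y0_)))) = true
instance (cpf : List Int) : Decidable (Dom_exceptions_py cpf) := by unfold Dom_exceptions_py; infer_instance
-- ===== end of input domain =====

-- B replaces A's join-into-a-string and membership in a tuple of 10 literal strings by a
-- direct test: all 11 entries equal the first one and that value is a digit 0-9 (simpler).

-- ===== PORT A =====
-- the tuple of 10 literal strings, as lists of chars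
def pvTable : List (List Char) :=
  ["00000000000".toList, "11111111111".toList, "22222222222".toList, "33333333333".toList,
   "44444444444".toList, "55555555555".toList, "66666666666".toList, "77777777777".toList,
   "88888888888".toList, "99999999999".toList]

def exceptions_py (cpf : List Int) : Bool :=
  if cpf.length ≠ 11 then true
  else
    -- cpf_str = "".join(str(x) for x in cpf): concatenation of the str(x) pieces (exact)
    let cpf_str := (cpf.map PySem.Int.toChars).flatten
    if pvTable.contains cpf_str then true else false

-- ===== PORT B =====
def exceptions_py_alt (cpf : List Int) : Bool :=
  if cpf.length ≠ 11 then true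
  else
    match cpf with
    | [] => false  -- unreachable: length = 11
    | d :: _ => (decide (0 ≤ d) && decide (d ≤ 9)) && cpf.all (fun x => x == d)

-- ===== PRECONDITION & SPEC =====
def Spec_exceptions_py (cpf : List Int) (out : Bool) : Prop := out = exceptions_py_alt cpf
instance (cpf : List Int) (out : Bool) : Decidable (Spec_exceptions_py cpf out) := by unfold Spec_exceptions_py; infer_instance

-- ===== CLAIM (what is proved, stated in full; the proofs are below) =====
def Claim_equal_exceptions_py : Prop := ∀ (cpf : List Int), Dom_exceptions_py cpf → Spec_exceptions_py cpf (exceptions_py cpf)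

-- ===== LEMMAS AND PROOFS =====

lemma toDigitsCore_len_lt (b : Nat) : ∀ (f n : Nat) (l : List Char), 0 < f →
    l.length < (Nat.toDigitsCore b f n l).length := by
  intro f
  induction f with
  | zero => intro n l h; omega
  | succ f ih =>
    intro n l _
    simp only [Nat.toDigitsCore]
    split
    · simp
    · rcases Nat.eq_zero_or_pos f with hf | hf
      · subst hf; simp [Nat.toDigitsCore]
      · have := ih (n / b) (Nat.digitChar (n % b) :: l) hf
        simp at this ⊢; omega

lemma toChars_ne_nil (x : Int) : PySem.Int.toChars x ≠ [] := by
  unfold PySem.Int.toChars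
  split
  · simp
  · intro h
    have := toDigitsCore_len_lt 10 (x.toNat + 1) x.toNat [] (by omega)
    simp only [Nat.toDigits] at h
    rw [h] at this
    simp at this

lemma toChars_digit (x : Int) (h0 : 0 ≤ x) (h9 : x ≤ 9) :
    PySem.Int.toChars x = [Nat.digitChar x.toNat] := by
  interval_cases x <;> decide

lemma toChars_singleton (x : Int) (c : Char) (h : PySem.Int.toChars x = [c]) :
    0 ≤ x ∧ x ≤ 9 ∧ c = Nat.digitChar x.toNat := by
  unfold PySem.Int.toChars at h
  split at h
  · exfalso
    have h2 : Nat.toDigits 10 x.natAbs = [] := (List.cons_eq_cons.mp h).2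
    have h3 := toDigitsCore_len_lt 10 (x.natAbs + 1) x.natAbs [] (by omega)
    simp only [Nat.toDigits] at h2
    rw [h2] at h3
    simp at h3
  · rename_i hx
    push Not at hx
    by_cases h9 : x ≤ 9
    · refine ⟨hx, h9, ?_⟩
      have := toChars_digit x hx h9
      unfold PySem.Int.toChars at this
      rw [if_neg (by omega)] at this
      rw [this] at h
      exact (List.cons.injEq _ _ _ _ ▸ h).1.symm
    · exfalso
      push Not at h9
      have hm : 10 ≤ x.toNat := by omega
      have hstep : Nat.toDigits 10 x.toNat
          = Nat.toDigitsCore 10 x.toNat (x.toNat / 10) (Nat.digitChar (x.toNat % 10) :: []) := by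
        simp only [Nat.toDigits, Nat.toDigitsCore]
        rw [if_neg (by omega)]
      have hlen := toDigitsCore_len_lt 10 x.toNat (x.toNat / 10)
        (Nat.digitChar (x.toNat % 10) :: []) (by omega)
      rw [← hstep, h] at hlen
      simp at hlen

lemma len_le_len_flatten {α : Type} : ∀ (ps : List (List α)),
    (∀ p ∈ ps, p ≠ []) → ps.length ≤ ps.flatten.length := by
  intro ps
  induction ps with
  | nil => simp
  | cons p rest ih =>
    intro h
    have hp : p ≠ [] := h p (by simp)
    have h1 : 1 ≤ p.length := by
      cases p with
      | nil => exact absurd rfl hp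
      | cons _ _ => simp
    have h2 := ih (fun q hq => h q (by simp [hq]))
    simp only [List.flatten_cons, List.length_append, List.length_cons]
    omega

lemma flatten_replicate_pieces {α : Type} (c : α) : ∀ (ps : List (List α)),
    (∀ p ∈ ps, p ≠ []) → ps.flatten = List.replicate ps.length c → ∀ p ∈ ps, p = [c] := by
  intro ps
  induction ps with
  | nil => simp
  | cons p rest ih =>
    intro hne hfl q hq
    cases p with
    | nil => exact absurd rfl (hne [] (by simp))
    | cons a p' =>
      simp only [List.flatten_cons, List.length_cons, List.replicate_succ, List.cons_append,
        List.cons.injEq] at hfl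
      obtain ⟨hac, htail⟩ := hfl
      have hlen := congrArg List.length htail
      simp only [List.length_append, List.length_replicate, List.length_flatten] at hlen
      have hrest := len_le_len_flatten rest (fun r hr => hne r (by simp [hr]))
      simp only [List.length_flatten] at hrest
      have hp' : p' = [] := by
        cases p' with
        | nil => rfl
        | cons _ _ => simp at hlen; omega
      subst hp' hac
      simp only [List.nil_append] at htail
      rcases List.mem_cons.mp hq with h | h
      · simp [h]
      · exact ih (fun r hr => hne r (by simp [hr])) htail q h

lemma flatten_replicate_singleton {α : Type} (c : α) (n : Nat) :
    (List.replicate n ([c] : List α)).flatten = List.replicate n c := by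
  induction n with
  | zero => rfl
  | succ n ih => simp [List.replicate_succ, ih]

lemma pvTable_eq : pvTable = (List.range 10).map (fun k => List.replicate 11 (Nat.digitChar k)) := by
  decide

lemma digitChar_inj : ∀ a < 10, ∀ b < 10, Nat.digitChar a = Nat.digitChar b → a = b := by decide

lemma main_iff (cpf : List Int) (d : Int) (rest : List Int) (hc : cpf = d :: rest)
    (hl : cpf.length = 11) :
    ((cpf.map PySem.Int.toChars).flatten ∈ pvTable) ↔
      (0 ≤ d ∧ d ≤ 9 ∧ ∀ x ∈ cpf, x = d) := by
  constructor
  · intro hmem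
    rw [pvTable_eq] at hmem
    obtain ⟨k, hk, hfl⟩ := List.mem_map.mp hmem
    have hk10 : k < 10 := List.mem_range.mp hk
    have hlen : (cpf.map PySem.Int.toChars).length = 11 := by simp [hl]
    have hall := flatten_replicate_pieces (Nat.digitChar k) (cpf.map PySem.Int.toChars)
      (by intro p hp; obtain ⟨x, _, hx⟩ := List.mem_map.mp hp; rw [← hx]; exact toChars_ne_nil x)
      (by rw [hlen, ← hfl])
    have hx : ∀ x ∈ cpf, 0 ≤ x ∧ x ≤ 9 ∧ Nat.digitChar k = Nat.digitChar x.toNat := by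
      intro x hxmem
      exact toChars_singleton x (Nat.digitChar k)
        (hall (PySem.Int.toChars x) (List.mem_map.mpr ⟨x, hxmem, rfl⟩))
    have hd := hx d (by simp [hc])
    refine ⟨hd.1, hd.2.1, ?_⟩
    intro x hxm
    have hxx := hx x hxm
    have h1 : x.toNat < 10 := by omega
    have h2 : d.toNat < 10 := by omega
    have := digitChar_inj x.toNat h1 d.toNat h2 (hxx.2.2 ▸ hd.2.2 ▸ rfl)
    omega
  · rintro ⟨h0, h9, hall⟩
    have hmap : cpf.map PySem.Int.toChars = List.replicate 11 [Nat.digitChar d.toNat] := by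
      apply List.eq_replicate_iff.mpr
      refine ⟨by simp [hl], ?_⟩
      intro p hp
      obtain ⟨x, hxm, hx⟩ := List.mem_map.mp hp
      rw [← hx, hall x hxm]
      exact toChars_digit d h0 h9
    rw [hmap, flatten_replicate_singleton, pvTable_eq]
    exact List.mem_map.mpr ⟨d.toNat, List.mem_range.mpr (by omega), rfl⟩

-- ===== VERDICT (by name: the statement is the Claim_ definition above) =====
theorem exceptions_py_spec : Claim_equal_exceptions_py := by
  intro cpf _
  unfold Spec_exceptions_py
  by_cases hl : cpf.length = 11
  · cases cpf with
    | nil => simp at hl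
    | cons d rest =>
      have hiff := main_iff (d :: rest) d rest rfl hl
      simp only [exceptions_py, exceptions_py_alt, hl, ne_eq, not_true_eq_false, if_false]
      rw [Bool.eq_iff_iff]
      simp only [Bool.ite_eq_true_distrib, Bool.and_eq_true, decide_eq_true_eq,
        List.all_eq_true, beq_iff_eq, List.contains_iff_mem]
      constructor
      · intro h
        split at h
        · rename_i hmem
          obtain ⟨h0, h9, hall⟩ := hiff.mp hmem
          exact ⟨⟨h0, h9⟩, hall⟩
        · exact absurd h (by simp)
      · rintro ⟨⟨h0, h9⟩, hall⟩
        rw [if_pos (hiff.mpr ⟨h0, h9, hall⟩)]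
        trivial
  · simp [exceptions_py, exceptions_py_alt, hl]
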